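-- pv_equiv track=rewrite | github.com/lynolz163/autosecaudit | autosecaudit/decision/audit_decision_maker.py | _dedupe_cve_ids
-- ===== SOURCE A (Python) =====
-- def _dedupe_cve_ids(values: list[str]) -> list[str]:
--     output: list[str] = []
--     seen: set[str] = set()
--     for item in values:
--         token = str(item).strip().upper()
--         if not token or token in seen:
--             continue
--         seen.add(token)
--         output.append(token)
--     return output
-- ===== SOURCE B (Python) =====
-- def _dedupe_cve_ids(values: list[str]) -> list[str]:
--     tokens = [t for t in (str(x).strip().upper() for x in values) if t]
--     output: list[str] = []
--     while tokens:
--         head = tokens[0]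
--         output.append(head)
--         tokens = [t for t in tokens[1:] if t != head]
--     return output
-- ===== Notes on version B (the rewrite author's own statement) =====
-- stated objective: alternative
-- what changed: Replaces the seen-set streaming loop by a shrinking-worklist dedup: normalize and filter first, then repeatedly take the head of the worklist and delete all of its remaining occurrences by filtering, maintaining no seen set and no membership test.
import Mathlib
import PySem

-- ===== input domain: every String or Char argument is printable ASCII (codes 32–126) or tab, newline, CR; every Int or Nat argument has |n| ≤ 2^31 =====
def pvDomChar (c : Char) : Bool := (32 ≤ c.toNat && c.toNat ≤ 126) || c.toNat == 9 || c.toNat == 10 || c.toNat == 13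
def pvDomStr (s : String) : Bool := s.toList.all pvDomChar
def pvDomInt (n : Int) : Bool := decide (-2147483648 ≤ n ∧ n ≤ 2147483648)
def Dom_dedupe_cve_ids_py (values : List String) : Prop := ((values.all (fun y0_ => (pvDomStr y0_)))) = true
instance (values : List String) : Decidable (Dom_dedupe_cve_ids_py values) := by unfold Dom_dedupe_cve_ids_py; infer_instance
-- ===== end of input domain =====

-- B replaces A's seen-set streaming loop by a shrinking-worklist dedup (take head, filter out its remaining occurrences); alternative algorithm, not claimed faster.
-- ===== PORT A =====
def pvNorm (item : String) : String := PySem.Str.upper (PySem.Str.strip item)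

def pvALoop : List String → List String → PySem.Set String → List String
  | [], output, _ => output
  | item :: rest, output, seen =>
    let token := pvNorm item
    if token == "" || PySem.Set.contains seen token then
      pvALoop rest output seen
    else
      pvALoop rest (output ++ [token]) (PySem.Set.add seen token)

def dedupe_cve_ids_py (values : List String) : List String :=
  pvALoop values [] PySem.Set.empty

-- ===== PORT B =====
def pvBLoop : List String → List String → List String
  | [], output => output
  | head :: rest, output =>
    pvBLoop (rest.filter (fun t => !(t == head))) (output ++ [head])
termination_by ts _ => ts.length
decreasing_by
  calc (List.filter (fun x => !(x.1 == head)) rest.attach).unattach.length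
      = (List.filter (fun x => !(x.1 == head)) rest.attach).length := List.length_unattach
    _ ≤ rest.attach.length := List.length_filter_le _ _
    _ = rest.length := List.length_attach
    _ < rest.length + 1 := Nat.lt_succ_self _

def dedupe_cve_ids_py_alt (values : List String) : List String :=
  pvBLoop ((values.map pvNorm).filter (fun t => !(t == ""))) []

-- ===== PRECONDITION & SPEC =====
def Spec_dedupe_cve_ids_py (values : List String) (out : List String) : Prop := out = dedupe_cve_ids_py_alt values
instance (values : List String) (out : List String) : Decidable (Spec_dedupe_cve_ids_py values out) := by unfold Spec_dedupe_cve_ids_py; infer_instance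

-- ===== CLAIM (what is proved, stated in full; the proofs are below) =====
def Claim_equal_dedupe_cve_ids_py : Prop := ∀ (values : List String), Dom_dedupe_cve_ids_py values → Spec_dedupe_cve_ids_py values (dedupe_cve_ids_py values)

-- ===== LEMMAS AND PROOFS =====

lemma pvBLoop_nil (out : List String) : pvBLoop [] out = out := by
  unfold pvBLoop; rfl

lemma pvBLoop_cons (h : String) (t out : List String) :
    pvBLoop (h :: t) out = pvBLoop (t.filter (fun x => !(x == h))) (out ++ [h]) := by
  conv_lhs => rw [pvBLoop.eq_def]

-- A's loop, with the invariant output = seen (as lists), equals a foldl of Set.add over the normalized, filtered stream.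
lemma pvALoop_eq (values : List String) :
    ∀ out : PySem.Set String,
      pvALoop values out out =
        ((values.map pvNorm).filter (fun t => !(t == ""))).foldl PySem.Set.add out := by
  induction values with
  | nil => intro out; simp [pvALoop]
  | cons item rest ih =>
    intro out
    by_cases he : pvNorm item == ""
    · simp [pvALoop, he, ih]
    · by_cases hc : pvNorm item ∈ out
      · have hadd : PySem.Set.add out (pvNorm item) = out := by
          simp [PySem.Set.add, hc]
        simp [pvALoop, he, hc, ih]
      · have hadd : PySem.Set.add out (pvNorm item) = out ++ [pvNorm item] := by
          simp [PySem.Set.add, hc]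
        simp [pvALoop, he, hc, ih]

-- The foldl of Set.add equals B's shrinking-worklist loop, generalized over the accumulator
-- (which plays both roles: A's seen set and B's output).
lemma foldl_add_eq_bloop : ∀ (ts acc : List String),
    ts.foldl PySem.Set.add acc = pvBLoop (ts.filter (fun t => !(t ∈ acc : Bool))) acc := by
  intro ts
  induction ts with
  | nil => intro acc; simp [pvBLoop_nil]
  | cons h t ih =>
    intro acc
    by_cases hm : h ∈ acc
    · have hadd : PySem.Set.add acc h = acc := by simp [PySem.Set.add, hm]
      simp only [List.foldl_cons, hadd, List.filter_cons]
      simp [hm, ih]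
    · have hadd : PySem.Set.add acc h = acc ++ [h] := by simp [PySem.Set.add, hm]
      have hfl : t.filter (fun t => !(t ∈ acc ++ [h] : Bool))
          = (t.filter (fun t => !(t ∈ acc : Bool))).filter (fun t => !(t == h)) := by
        rw [List.filter_filter]
        apply List.filter_congr
        intro x _
        by_cases hx : x = h <;> simp [hx, hm]
      rw [List.foldl_cons, hadd, ih (acc ++ [h]), hfl, List.filter_cons]
      simp only [hm]
      simp [pvBLoop_cons, List.filter_filter]

-- ===== VERDICT (by name: the statement is the Claim_ definition above) =====
theorem dedupe_cve_ids_py_spec : Claim_equal_dedupe_cve_ids_py := by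
  intro values _
  unfold Spec_dedupe_cve_ids_py dedupe_cve_ids_py dedupe_cve_ids_py_alt
  rw [show (PySem.Set.empty : PySem.Set String) = ([] : List String) from rfl,
      pvALoop_eq values [], foldl_add_eq_bloop]
  simp
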